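-- pv_equiv track=rewrite | github.com/te42kyfo/warpspeed | warpspeed/griditeration.py | countBankConflicts
-- ===== SOURCE A (Python) =====
-- def countBankConflicts(totalLength, laneAddresses, datatype=8):
--     addresses = list(set([l // datatype for l in laneAddresses]))
--
--     banks = [0] * (totalLength // datatype)
--     maxCycles = 0
--     for a in addresses:
--         bank = int(a) % (totalLength // datatype)
--         banks[bank] += 1
--         maxCycles = max(maxCycles, banks[bank])
--     return maxCycles
-- ===== SOURCE B (Python) =====
-- def countBankConflicts(totalLength, laneAddresses, datatype=8):
--     numBanks = totalLength // datatype
--     bankIndices = sorted(a % numBanks for a in {l // datatype for l in laneAddresses})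
--     best = 0
--     run = 0
--     prev = None
--     for b in bankIndices:
--         if run and b == prev:
--             run += 1
--         else:
--             run = 1
--         prev = b
--         best = max(best, run)
--     return best
-- ===== Notes on version B (the rewrite author's own statement) =====
-- stated objective: alternative
-- what changed: Replaces A's preallocated per-bank count table with a running max by sorting the bank indices of the distinct addresses and scanning once for the longest run of equal values; no table of size totalLength//datatype is allocated.
import Mathlib
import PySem

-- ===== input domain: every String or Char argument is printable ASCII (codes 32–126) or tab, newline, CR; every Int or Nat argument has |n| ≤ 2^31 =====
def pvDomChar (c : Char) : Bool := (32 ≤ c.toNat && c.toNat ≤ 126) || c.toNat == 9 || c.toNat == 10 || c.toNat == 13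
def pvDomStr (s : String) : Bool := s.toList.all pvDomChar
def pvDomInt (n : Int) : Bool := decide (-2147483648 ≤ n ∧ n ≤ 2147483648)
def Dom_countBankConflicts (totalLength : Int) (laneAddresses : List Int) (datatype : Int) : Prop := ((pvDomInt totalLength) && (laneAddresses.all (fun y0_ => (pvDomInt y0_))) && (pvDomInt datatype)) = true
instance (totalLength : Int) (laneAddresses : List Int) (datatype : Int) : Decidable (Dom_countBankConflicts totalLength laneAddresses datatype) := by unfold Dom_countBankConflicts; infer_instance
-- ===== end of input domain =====

-- B replaces A's bank-count table + running max by sort-the-bank-indices and a single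
-- longest-equal-run scan (alternative decomposition; avoids allocating the table).


-- ===== PORT A =====
def countBankConflicts (totalLength : Int) (laneAddresses : List Int) (datatype : Int) : Int :=
  let addresses : List Int := PySem.Set.ofList (laneAddresses.map (fun l => PySem.Int.floordiv l datatype))
  let numBanks : Int := PySem.Int.floordiv totalLength datatype
  let banks : List Int := PySem.List.pyRepeat [0] numBanks
  (addresses.foldl (fun (st : List Int × Int) a =>
      let bank := PySem.Int.mod a numBanks
      let banks' := PySem.List.pySetD st.1 bank (PySem.List.pyGetD st.1 bank 0 + 1)
      (banks', max st.2 (PySem.List.pyGetD banks' bank 0))) (banks, 0)).2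

-- ===== PORT B =====
def countBankConflicts_alt (totalLength : Int) (laneAddresses : List Int) (datatype : Int) : Int :=
  let numBanks : Int := PySem.Int.floordiv totalLength datatype
  let bankIndices : List Int :=
    PySem.List.sorted ((PySem.Set.ofList (laneAddresses.map (fun l => PySem.Int.floordiv l datatype))).map
      (fun a => PySem.Int.mod a numBanks)) (fun x => x) false
  (bankIndices.foldl (fun (st : Int × Int × Option Int) b =>
      let run := if 0 < st.2.1 ∧ st.2.2 = some b then st.2.1 + 1 else 1
      (max st.1 run, run, some b)) (0, 0, (none : Option Int))).1

-- ===== PRECONDITION & SPEC =====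
-- Pre_ excludes exactly the inputs where A raises: datatype = 0 (ZeroDivisionError), and a
-- nonempty address set with totalLength // datatype ≤ 0 (ZeroDivisionError / IndexError).
def Pre_countBankConflicts (totalLength : Int) (laneAddresses : List Int) (datatype : Int) : Prop :=
  datatype ≠ 0 ∧ (laneAddresses = [] ∨ 0 < PySem.Int.floordiv totalLength datatype)
instance (totalLength : Int) (laneAddresses : List Int) (datatype : Int) : Decidable (Pre_countBankConflicts totalLength laneAddresses datatype) := by unfold Pre_countBankConflicts; infer_instance
def pvWitness_countBankConflicts : Int × List Int × Int := (64, [0, 8, 16, 9], 8)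


def Spec_countBankConflicts (totalLength : Int) (laneAddresses : List Int) (datatype : Int) (out : Int) : Prop := out = countBankConflicts_alt totalLength laneAddresses datatype
instance (totalLength : Int) (laneAddresses : List Int) (datatype : Int) (out : Int) : Decidable (Spec_countBankConflicts totalLength laneAddresses datatype out) := by unfold Spec_countBankConflicts; infer_instance

-- ===== CLAIM (what is proved, stated in full; the proofs are below) =====
def Claim_equal_countBankConflicts : Prop := ∀ (totalLength : Int) (laneAddresses : List Int) (datatype : Int), Dom_countBankConflicts totalLength laneAddresses datatype → Pre_countBankConflicts totalLength laneAddresses datatype → Spec_countBankConflicts totalLength laneAddresses datatype (countBankConflicts totalLength laneAddresses datatype)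

-- ===== LEMMAS AND PROOFS =====

-- max multiplicity, peeling from the head: the head's count among the rest, plus one
def pvM : List Int → Int
  | [] => 0
  | a :: r => max (pvM r) ((r.count a : Int) + 1)

theorem pvM_perm {xs ys : List Int} (h : xs.Perm ys) : pvM xs = pvM ys := by
  induction h with
  | nil => rfl
  | cons x _ ih =>
      simp only [pvM, ih]
      rw [List.Perm.count_eq (by assumption)]
  | swap x y l =>
      simp only [pvM, List.count_cons]
      by_cases hxy : x = y
      · subst hxy; simp
      · have h1 : (y == x) = false := by simp [Ne.symm hxy]
        have h2 : (x == y) = false := by simp [hxy]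
        simp [h1, h2]
        omega
  | trans _ _ ih1 ih2 => exact ih1.trans ih2

theorem countBankConflicts_sorted_le_getLast {l : List Int} (hs : l.Pairwise (· ≤ ·)) {x : Int}
    (hx : x ∈ l) (h : l ≠ []) : x ≤ l.getLast h := by
  induction l with
  | nil => simp at hx
  | cons a t ih =>
      rcases List.mem_cons.mp hx with rfl | hxt
      · cases t with
        | nil => simp
        | cons b u =>
            have : x ≤ (b :: u).getLast (by simp) := by
              have hb : ∀ y ∈ b :: u, x ≤ y := (List.pairwise_cons.mp hs).1
              exact hb _ (List.getLast_mem _)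
            simpa using this
      · cases t with
        | nil => simp at hxt
        | cons b u =>
            have := ih (List.pairwise_cons.mp hs).2 hxt (by simp)
            simpa using this

-- B's scan step
def pvStepB (st : Int × Int × Option Int) (b : Int) : Int × Int × Option Int :=
  let run := if 0 < st.2.1 ∧ st.2.2 = some b then st.2.1 + 1 else 1
  (max st.1 run, run, some b)

theorem pvScanB (l : List Int) (hs : l.Pairwise (· ≤ ·)) :
    (l.foldl pvStepB (0, 0, (none : Option Int))).1 = pvM l.reverse ∧
    (l.foldl pvStepB (0, 0, (none : Option Int))).2.2 = l.getLast? ∧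
    (∀ v, l.getLast? = some v → (l.foldl pvStepB (0, 0, (none : Option Int))).2.1 = (l.count v : Int)) := by
  induction l using List.reverseRecOn with
  | nil => simp [pvM]
  | append_singleton l a ih =>
      have hsl : l.Pairwise (· ≤ ·) := (List.pairwise_append.mp hs).1
      have hle : ∀ x ∈ l, x ≤ a := by
        intro x hx
        exact (List.pairwise_append.mp hs).2.2 x hx a (by simp)
      obtain ⟨ih1, ih2, ih3⟩ := ih hsl
      rw [List.foldl_append]
      cases hl : l with
      | nil =>
          subst hl
          simp [pvStepB, pvM]
      | cons b t =>
          have hne : l ≠ [] := by rw [hl]; simp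
          have hlast : l.getLast? = some (l.getLast hne) := List.getLast?_eq_some_getLast hne
          rw [← hl] at *
          set st := l.foldl pvStepB (0, 0, (none : Option Int)) with hst
          have hrun : st.2.1 = (l.count (l.getLast hne) : Int) := ih3 _ hlast
          have hprev : st.2.2 = some (l.getLast hne) := by rw [ih2, hlast]
          have hcnt_pos : 0 < l.count (l.getLast hne) := List.count_pos_iff.mpr (List.getLast_mem _)
          by_cases hEq : l.getLast hne = a
          · -- run extends
            have hcond : (0 < st.2.1 ∧ st.2.2 = some a) := by
              constructor
              · rw [hrun]; exact_mod_cast hcnt_pos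
              · rw [hprev, hEq]
            constructor
            · show max st.1 _ = _
              simp only [if_pos hcond]
              rw [ih1, hrun, hEq]
              have : pvM ((l ++ [a]).reverse) = max (pvM l.reverse) ((l.reverse.count a : Int) + 1) := by
                simp [pvM]
              rw [this, List.count_reverse]
            constructor
            · simp [pvStepB]
            · intro v hv
              have hv' : a = v := by simpa using hv
              subst hv'
              show (if 0 < st.2.1 ∧ st.2.2 = some a then st.2.1 + 1 else 1) = ((l ++ [a]).count a : Int)
              rw [if_pos hcond, hrun, hEq]
              simp [List.count_append]
          · -- new value: a not in l
            have hnotin : a ∉ l := by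
              intro hmem
              exact hEq (le_antisymm (hle _ (List.getLast_mem hne))
                (countBankConflicts_sorted_le_getLast hsl hmem hne))
            have hcond : ¬ (0 < st.2.1 ∧ st.2.2 = some a) := by
              rintro ⟨_, hp⟩
              rw [hprev] at hp
              exact hEq (by simpa using hp)
            have hcount0 : l.count a = 0 := List.count_eq_zero.mpr hnotin
            constructor
            · show max st.1 _ = _
              simp only [if_neg hcond]
              rw [ih1]
              have : pvM ((l ++ [a]).reverse) = max (pvM l.reverse) ((l.reverse.count a : Int) + 1) := by
                simp [pvM]
              rw [this, List.count_reverse, hcount0]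
              simp
            constructor
            · simp [pvStepB]
            · intro v hv
              have hv' : a = v := by simpa using hv
              subst hv'
              show (if 0 < st.2.1 ∧ st.2.2 = some a then st.2.1 + 1 else 1) = ((l ++ [a]).count a : Int)
              rw [if_neg hcond]
              simp [List.count_append, hcount0]

-- A's loop step (with n the bank count)
def pvStepA (n : Int) (st : List Int × Int) (a : Int) : List Int × Int :=
  let bank := PySem.Int.mod a n
  let banks' := PySem.List.pySetD st.1 bank (PySem.List.pyGetD st.1 bank 0 + 1)
  (banks', max st.2 (PySem.List.pyGetD banks' bank 0))

theorem pvLoopA (n : Int) (hn : 0 < n) :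
    ∀ (as_ : List Int) (banks : List Int) (mc : Int) (done : List Int),
      banks.length = n.toNat →
      (∀ (j : Nat) (hj : j < banks.length), banks[j] = (done.count (j : Int) : Int)) →
      mc = pvM done.reverse →
      (as_.foldl (pvStepA n) (banks, mc)).2
        = pvM ((done ++ as_.map (fun a => PySem.Int.mod a n)).reverse) := by
  intro as_
  induction as_ with
  | nil =>
      intro banks mc done _ _ hmc
      simpa using hmc
  | cons a rest ih =>
      intro banks mc done hlen hinv hmc
      simp only [List.foldl_cons]
      have hb0 : 0 ≤ PySem.Int.mod a n := PySem.Int.mod_nonneg a hn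
      have hblt : PySem.Int.mod a n < n := PySem.Int.mod_lt a hn
      set bank := PySem.Int.mod a n with hbank
      have hk : bank.toNat < banks.length := by rw [hlen]; omega
      have hcnt : banks[bank.toNat] = (done.count bank : Int) := by
        have := hinv bank.toNat hk
        rwa [Int.toNat_of_nonneg hb0] at this
      have hget : PySem.List.pyGetD banks bank 0 = banks[bank.toNat] := by
        rw [PySem.List.pyGetD_of_nonneg _ _ hb0]
        simp [List.getD, List.getElem?_eq_getElem hk]
      have hset : PySem.List.pySetD banks bank (PySem.List.pyGetD banks bank 0 + 1)
          = banks.set bank.toNat (banks[bank.toNat] + 1) := by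
        rw [PySem.List.pySetD_of_nonneg _ _ hb0, hget]
      have hget' : PySem.List.pyGetD (banks.set bank.toNat (banks[bank.toNat] + 1)) bank 0
          = banks[bank.toNat] + 1 := by
        rw [PySem.List.pyGetD_of_nonneg _ _ hb0]
        simp [List.getD, List.getElem?_eq_getElem (show bank.toNat < (banks.set bank.toNat (banks[bank.toNat] + 1)).length by simpa using hk)]
      have hstep : pvStepA n (banks, mc) a
          = (banks.set bank.toNat (banks[bank.toNat] + 1),
             max mc (banks[bank.toNat] + 1)) := by
        simp only [pvStepA, ← hbank, hset, hget']
      rw [hstep]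
      have hnewmc : max mc (banks[bank.toNat] + 1) = pvM ((done ++ [bank]).reverse) := by
        rw [hcnt, hmc]
        simp [pvM, List.count_reverse]
      have hnewinv : ∀ (j : Nat) (hj : j < (banks.set bank.toNat (banks[bank.toNat] + 1)).length),
          (banks.set bank.toNat (banks[bank.toNat] + 1))[j]
            = ((done ++ [bank]).count (j : Int) : Int) := by
        intro j hj
        have hj' : j < banks.length := by simpa using hj
        rw [List.count_append, List.getElem_set hj]
        by_cases hje : bank.toNat = j
        · have hcast : ((j : Int) = bank) := by omega
          rw [if_pos hje, hcnt, hcast]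
          simp
        · have hne : ((j : Int) ≠ bank) := by omega
          rw [if_neg hje, hinv j hj']
          simp [Ne.symm hne]
      have := ih (banks.set bank.toNat (banks[bank.toNat] + 1))
        (max mc (banks[bank.toNat] + 1)) (done ++ [bank])
        (by simpa using hlen) hnewinv hnewmc
      rw [this]
      simp
      rw [hbank]

-- ===== VERDICT (by name: the statement is the Claim_ definition above) =====
theorem countBankConflicts_spec : Claim_equal_countBankConflicts := by
  intro totalLength laneAddresses datatype _ hpre
  unfold Spec_countBankConflicts countBankConflicts countBankConflicts_alt
  obtain ⟨hd, hcase⟩ := hpre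
  set n := PySem.Int.floordiv totalLength datatype with hn
  set addrs := PySem.Set.ofList (laneAddresses.map (fun l => PySem.Int.floordiv l datatype)) with haddrs
  rcases hcase with hnil | hpos
  · subst hnil
    rfl
  · -- A's fold equals pvM of the bank list
    have hA : (addrs.foldl (pvStepA n) (PySem.List.pyRepeat [0] n, 0)).2
        = pvM ((addrs.map (fun a => PySem.Int.mod a n)).reverse) := by
      have hrep : (PySem.List.pyRepeat ([0] : List Int) n).length = n.toNat := by
        rw [PySem.List.pyRepeat_singleton]; simp
      have := pvLoopA n hpos addrs (PySem.List.pyRepeat [0] n) 0 []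
        hrep
        (by
          intro j hj
          simp [PySem.List.pyRepeat_singleton])
        (by simp [pvM])
      simpa using this
    have hB : ∀ (l : List Int),
        ((PySem.List.sorted l (fun x => x) false).foldl pvStepB (0, 0, (none : Option Int))).1
          = pvM (PySem.List.sorted l (fun x => x) false).reverse := by
      intro l
      exact (pvScanB _ (by simpa using PySem.List.sorted_pairwise l (fun x => x))).1
    have hperm : ((PySem.List.sorted (addrs.map (fun a => PySem.Int.mod a n)) (fun x => x) false).reverse).Perm
        ((addrs.map (fun a => PySem.Int.mod a n)).reverse) :=
      (List.reverse_perm _).trans ((PySem.List.sorted_perm _ _ _).trans (List.reverse_perm _).symm)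
    show (addrs.foldl _ (PySem.List.pyRepeat [0] n, 0)).2 = _
    rw [show (fun (st : List Int × Int) a =>
          let bank := PySem.Int.mod a n
          let banks' := PySem.List.pySetD st.1 bank (PySem.List.pyGetD st.1 bank 0 + 1)
          (banks', max st.2 (PySem.List.pyGetD banks' bank 0))) = pvStepA n from rfl]
    rw [show (fun (st : Int × Int × Option Int) b =>
          let run := if 0 < st.2.1 ∧ st.2.2 = some b then st.2.1 + 1 else 1
          (max st.1 run, run, some b)) = pvStepB from rfl]
    rw [hA, hB, pvM_perm hperm]
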